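-- pv_equiv track=rewrite | github.com/hmmessai/alx-backend | 0x00-pagination/2-hypermedia_pagination.py | index_range
-- ===== SOURCE A (Python) =====
-- from typing import Dict, List, Tuple
--
-- def index_range(page: int, page_size: int) -> Tuple[int, int]:
--     """
--     Returns the start and stop indexes of a page
--     """
--
--     total_page = (page * page_size) - 1
--     start = 0
--     end = page_size
--
--     for i in range(0, total_page, page_size):
--         start = i
--         end = i + page_size
--
--     return (start, end)
-- ===== SOURCE B (Python) =====
-- def index_range(page, page_size):
--     """Closed-form start/end indexes of a page (O(1) instead of A's O(page) loop)."""
--     if page < 1: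
--         return (0, page_size)
--     return ((page - 1) * page_size, page * page_size)
-- ===== Notes on version B (the rewrite author's own statement) =====
-- stated objective: faster
-- what changed: Replaced A's O(page) loop over range(0, page*page_size-1, page_size) by the closed-form ((page-1)*page_size, page*page_size) with (0, page_size) for page < 1.
-- intended difference: For page_size == 1 with page >= 2 A returns (page-2, page-1), and for negative page_size with page >= 1 A returns (page*page_size, (page+1)*page_size) -- in both cases one page off because A's loop bound page*page_size - 1 is off by one; B returns the intended ((page-1)*page_size, page*page_size). — e.g. on index_range(3, 1): A returns (1, 2), B returns (2, 3)
import Mathlib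
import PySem

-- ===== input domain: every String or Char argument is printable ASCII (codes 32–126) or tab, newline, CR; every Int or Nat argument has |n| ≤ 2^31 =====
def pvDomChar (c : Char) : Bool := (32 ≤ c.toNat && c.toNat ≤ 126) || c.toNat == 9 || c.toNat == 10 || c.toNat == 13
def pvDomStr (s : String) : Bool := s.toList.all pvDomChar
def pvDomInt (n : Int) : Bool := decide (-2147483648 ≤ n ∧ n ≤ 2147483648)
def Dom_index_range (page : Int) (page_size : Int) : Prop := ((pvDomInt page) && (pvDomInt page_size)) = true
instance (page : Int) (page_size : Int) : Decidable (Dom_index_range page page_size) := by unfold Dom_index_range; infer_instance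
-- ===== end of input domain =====

-- B replaces A's O(page) loop over range(0, page*page_size-1, page_size) by a closed form.

-- ===== PORT A =====
def index_range (page : Int) (page_size : Int) : Int × Int :=
  let total_page := page * page_size - 1
  let start : Int := 0
  let endv : Int := page_size
  (PySem.List.pyRange 0 total_page page_size).foldl
    (fun _ i => (i, i + page_size)) (start, endv)

-- ===== PORT B =====
def index_range_alt (page : Int) (page_size : Int) : Int × Int :=
  if page < 1 then (0, page_size)
  else ((page - 1) * page_size, page * page_size)

-- ===== PRECONDITION & SPEC =====
-- A raises ValueError (range() step must not be zero) when page_size = 0; that is all Pre_ excludes.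
def Pre_index_range (page : Int) (page_size : Int) : Prop := page_size ≠ 0
instance (page : Int) (page_size : Int) : Decidable (Pre_index_range page page_size) := by unfold Pre_index_range; infer_instance
def pvWitness_index_range : Int × Int := (2, 3)

-- For page_size == 1 with page >= 2 A returns (page-2, page-1), and for negative page_size with
-- page >= 1 A returns (page*page_size, (page+1)*page_size) -- in both cases one page off because
-- A's loop bound page*page_size - 1 is off by one; B returns the intended
-- ((page-1)*page_size, page*page_size).
def D_index_range (page : Int) (page_size : Int) : Prop :=
  (page_size = 1 ∧ 2 ≤ page) ∨ (page_size < 0 ∧ 1 ≤ page)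
instance (page : Int) (page_size : Int) : Decidable (D_index_range page page_size) := by unfold D_index_range; infer_instance

def Spec_index_range (page : Int) (page_size : Int) (out : Int × Int) : Prop :=
  ¬ D_index_range page page_size → out = index_range_alt page page_size
instance (page : Int) (page_size : Int) (out : Int × Int) : Decidable (Spec_index_range page page_size out) := by unfold Spec_index_range; infer_instance

def pvDiffWitness_index_range : Int × Int := (3, 1)
def pvDiffWitnessOut_index_range : (Int × Int) × (Int × Int) := ((1, 2), (2, 3))

-- ===== CLAIM (what is proved, stated in full; the proofs are below) =====
def Claim_unchanged_index_range : Prop := ∀ (page : Int) (page_size : Int), Dom_index_range page page_size → Pre_index_range page page_size → Spec_index_range page page_size (index_range page page_size)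
def Claim_changed_index_range : Prop := Dom_index_range (pvDiffWitness_index_range.1) (pvDiffWitness_index_range.2) ∧ Pre_index_range (pvDiffWitness_index_range.1) (pvDiffWitness_index_range.2) ∧ D_index_range (pvDiffWitness_index_range.1) (pvDiffWitness_index_range.2) ∧ index_range (pvDiffWitness_index_range.1) (pvDiffWitness_index_range.2) = pvDiffWitnessOut_index_range.1 ∧ index_range_alt (pvDiffWitness_index_range.1) (pvDiffWitness_index_range.2) = pvDiffWitnessOut_index_range.2 ∧ pvDiffWitnessOut_index_range.1 ≠ pvDiffWitnessOut_index_range.2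
def Claim_exact_index_range : Prop := ∀ (page : Int) (page_size : Int), Dom_index_range page page_size → Pre_index_range page page_size → D_index_range page page_size → index_range page page_size ≠ index_range_alt page page_size

-- ===== LEMMAS AND PROOFS =====

-- A's loop only keeps the last index of the range: a state-ignoring foldl is init on the empty
-- list and g of the last element otherwise.
lemma foldl_range_map_last (g : Int → Int × Int) (init : Int × Int) (h : Nat → Int) (n : Nat) :
    ((List.range n).map h).foldl (fun _ i => g i) init
      = if n = 0 then init else g (h (n - 1)) := by
  induction n with
  | zero => simp
  | succ m ih => simp [List.range_succ, List.foldl_append]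

-- A's value as a function of the length n of the range it loops over
lemma index_range_eval (page ps : Int) (hps : ps ≠ 0) (n : Nat)
    (hn : (if 0 < ps then (if (0:Int) < page * ps - 1 then ((page * ps - 1 - 0 + ps - 1)/ps).toNat else 0)
           else (if page * ps - 1 < 0 then ((0 - (page * ps - 1) + -ps - 1)/(-ps)).toNat else 0)) = n) :
    index_range page ps
      = if n = 0 then (0, ps) else (0 + ps * ((n:Int) - 1), 0 + ps * ((n:Int) - 1) + ps) := by
  unfold index_range
  simp only [PySem.List.pyRange, if_neg hps]
  rw [foldl_range_map_last, hn]
  rcases n with _ | m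
  · simp
  · simp

lemma index_range_pos_le_zero (page ps : Int) (hps : 0 < ps) (hp : page ≤ 0) :
    index_range page ps = (0, ps) := by
  have h := index_range_eval page ps (by omega) 0 (by
    rw [if_pos hps, if_neg (by nlinarith : ¬ ((0:Int) < page * ps - 1))])
  simpa using h

lemma index_range_pos_one (ps : Int) (hps : 0 < ps) : index_range 1 ps = (0, ps) := by
  rcases lt_or_ge 1 ps with h1 | h1
  · have hdiv : ((1 * ps - 1 - 0 + ps - 1) / ps).toNat = 1 := by
      have he : (1 * ps - 1 - 0 + ps - 1) = (ps - 2) + 1 * ps := by ring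
      rw [he, Int.add_mul_ediv_right _ _ (by omega : ps ≠ 0),
          Int.ediv_eq_zero_of_lt (by omega) (by omega)]
      rfl
    have h := index_range_eval 1 ps (by omega) 1 (by
      rw [if_pos hps, if_pos (by omega : (0:Int) < 1 * ps - 1), hdiv])
    simpa using h
  · have h := index_range_eval 1 ps (by omega) 0 (by
      rw [if_pos hps, if_neg (by omega : ¬ ((0:Int) < 1 * ps - 1))])
    simpa using h

lemma index_range_big (page ps : Int) (hps : 2 ≤ ps) (hp : 2 ≤ page) :
    index_range page ps = ((page - 1) * ps, page * ps) := by
  have hdiv : ((page * ps - 1 - 0 + ps - 1) / ps).toNat = page.toNat := by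
    have he : (page * ps - 1 - 0 + ps - 1) = (ps - 2) + page * ps := by ring
    rw [he, Int.add_mul_ediv_right _ _ (by omega : ps ≠ 0),
        Int.ediv_eq_zero_of_lt (by omega) (by omega), zero_add]
  have h := index_range_eval page ps (by omega) page.toNat (by
    rw [if_pos (by omega : (0:Int) < ps),
        if_pos (by nlinarith : (0:Int) < page * ps - 1), hdiv])
  rw [h, if_neg (by omega : ¬ page.toNat = 0)]
  have hc : ((page.toNat : Int)) = page := by omega
  rw [hc]
  rw [Prod.mk.injEq]; constructor <;> ring

lemma index_range_neg_neg (page ps : Int) (hps : ps < 0) (hp : page ≤ -1) :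
    index_range page ps = (0, ps) := by
  have h := index_range_eval page ps (by omega) 0 (by
    rw [if_neg (by omega : ¬ (0:Int) < ps),
        if_neg (by nlinarith : ¬ (page * ps - 1 < 0))])
  simpa using h

lemma index_range_neg_zero (ps : Int) (hps : ps < 0) : index_range 0 ps = (0, ps) := by
  have hdiv : ((0 - ((0:Int) * ps - 1) + -ps - 1) / (-ps)).toNat = 1 := by
    have he : (0 - ((0:Int) * ps - 1) + -ps - 1) = -ps := by ring
    rw [he, Int.ediv_self (by omega : (-ps) ≠ 0)]; rfl
  have h := index_range_eval 0 ps (by omega) 1 (by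
    rw [if_neg (by omega : ¬ (0:Int) < ps),
        if_pos (by omega : (0:Int) * ps - 1 < 0), hdiv])
  simpa using h

lemma index_range_neg_pos (page ps : Int) (hps : ps < 0) (hp : 1 ≤ page) :
    index_range page ps = (ps * page, ps * page + ps) := by
  have hdiv : ((0 - (page * ps - 1) + -ps - 1) / (-ps)).toNat = (page + 1).toNat := by
    have he : (0 - (page * ps - 1) + -ps - 1) = (page + 1) * (-ps) := by ring
    rw [he, Int.mul_ediv_cancel _ (by omega : (-ps) ≠ 0)]
  have h := index_range_eval page ps (by omega) (page + 1).toNat (by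
    rw [if_neg (by omega : ¬ (0:Int) < ps),
        if_pos (by nlinarith : page * ps - 1 < 0), hdiv])
  rw [h, if_neg (by omega : ¬ (page + 1).toNat = 0)]
  have hc : (((page + 1).toNat : Int)) = page + 1 := by omega
  rw [hc]
  rw [Prod.mk.injEq]; constructor <;> ring

lemma index_range_one_big (page : Int) (hp : 2 ≤ page) :
    index_range page 1 = (page - 2, page - 1) := by
  have hdiv : ((page * 1 - 1 - 0 + 1 - 1) / 1).toNat = (page - 1).toNat := by
    rw [Int.ediv_one]; omega
  have h := index_range_eval page 1 (by omega) (page - 1).toNat (by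
    rw [if_pos (by omega : (0:Int) < 1),
        if_pos (by omega : (0:Int) < page * 1 - 1), hdiv])
  rw [h, if_neg (by omega : ¬ (page - 1).toNat = 0)]
  have hc : (((page - 1).toNat : Int)) = page - 1 := by omega
  rw [hc]
  rw [Prod.mk.injEq]; constructor <;> ring

-- ===== VERDICT (by name: the statement is the Claim_ definition above) =====
theorem index_range_spec : Claim_unchanged_index_range := by
  intro page ps _ hpre
  intro hD
  unfold Pre_index_range at hpre
  unfold D_index_range at hD
  push_neg at hD
  unfold index_range_alt
  rcases lt_or_gt_of_ne hpre with hneg | hpos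
  · -- ps < 0: ¬D forces page ≤ 0
    have hple : page ≤ 0 := by
      by_contra hc
      exact absurd (hD.2 hneg) (by omega)
    rcases lt_or_ge page 0 with h0 | h0
    · rw [index_range_neg_neg page ps hneg (by omega), if_pos (by omega)]
    · have hz : page = 0 := by omega
      subst hz
      rw [index_range_neg_zero ps hneg, if_pos (by omega)]
  · rcases lt_or_ge page 1 with h1 | h1
    · rw [index_range_pos_le_zero page ps hpos (by omega), if_pos h1]
    · rcases eq_or_lt_of_le h1 with he | h2
      · subst he
        rw [index_range_pos_one ps hpos, if_neg (by omega)]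
        rw [Prod.mk.injEq]; constructor <;> ring
      · -- page ≥ 2, so ¬D forces ps ≠ 1, hence ps ≥ 2
        have hps1 : ps ≠ 1 := fun h => absurd (hD.1 h) (by omega)
        rw [index_range_big page ps (by omega) (by omega), if_neg (by omega)]

theorem index_range_changed : Claim_changed_index_range := by
  unfold Claim_changed_index_range; decide

theorem index_range_tight : Claim_exact_index_range := by
  intro page ps _ hpre hD
  unfold index_range_alt
  rcases hD with ⟨hone, hp⟩ | ⟨hneg, hp⟩
  · subst hone
    rw [index_range_one_big page hp, if_neg (by omega)]
    intro heq
    simp only [Prod.mk.injEq] at heq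
    omega
  · rw [index_range_neg_pos page ps hneg hp, if_neg (by omega)]
    intro heq
    simp only [Prod.mk.injEq] at heq
    linarith [mul_comm ps page, heq.2]
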